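-- pv_equiv track=rewrite | github.com/Kimuksung/codewars-programmers | Programmers-숫자 게임.py | solution
-- ===== SOURCE A (Python) =====
-- import bisect
--
-- def solution(A, B):
--     answer = 0
--     B.sort()
--     for a in A :
--         i = bisect.bisect_right(B,a)
--         if i>len(B)-1:
--             del B[0]
--         else :
--             if B[i]>a:
--                 answer+=1
--             del B[i]
--
--     return answer
-- ===== SOURCE B (Python) =====
-- def solution(A, B):
--     A_sorted = sorted(A)
--     B_sorted = sorted(B)
--     ans = 0
--     for b in B_sorted:
--         if ans < len(A_sorted) and b > A_sorted[ans]: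
--             ans += 1
--     return ans
-- ===== Notes on version B (the rewrite author's own statement) =====
-- stated objective: faster
-- what changed: Replaced the per-card bisect-and-delete loop over A (each del is O(n)) by sorting both lists once and running a single two-pointer greedy pass over sorted B against sorted A.
-- crash fix: On inputs with len(A) > len(B), A raises IndexError (it deletes one element of B per card of A and runs out); B returns the match count computed from all available cards (0 when B is empty). — e.g. on solution([0], []): A raises IndexError, B returns 0
import Mathlib
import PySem

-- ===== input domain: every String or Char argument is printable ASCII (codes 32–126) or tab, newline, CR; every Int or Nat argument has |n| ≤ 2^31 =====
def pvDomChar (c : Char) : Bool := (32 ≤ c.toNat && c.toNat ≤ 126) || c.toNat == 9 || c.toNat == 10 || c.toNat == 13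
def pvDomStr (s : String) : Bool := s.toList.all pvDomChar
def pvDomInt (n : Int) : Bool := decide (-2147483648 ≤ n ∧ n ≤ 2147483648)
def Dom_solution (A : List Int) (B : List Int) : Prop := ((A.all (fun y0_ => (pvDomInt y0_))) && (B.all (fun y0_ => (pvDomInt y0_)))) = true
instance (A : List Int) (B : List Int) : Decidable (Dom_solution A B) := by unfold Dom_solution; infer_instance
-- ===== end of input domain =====

-- B replaces A's bisect-and-delete loop (O(n) deletions) by a one-pass two-pointer greedy over
-- both sorted lists (objective: faster). Note: the Python A sorts and empties B in place; the
-- equivalence proved here is about the RETURN value only (B does not mutate its arguments).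

-- ===== PORT A =====
-- loop 'for a in A', state = (remaining B, answer); B is sorted at entry and stays sorted.
def solutionGoA : List Int → List Int → Int → Int
  | [], _, answer => answer
  | a :: as, S, answer =>
    let i := PySem.List.bisectRight S a
    if (i : Int) > (S.length : Int) - 1 then
      solutionGoA as (S.eraseIdx 0) answer            -- del B[0] (raises on empty B: outside Pre_)
    else
      -- 'if B[i] > a: answer += 1' then 'del B[i]'; B[i] with 0 ≤ i < len is exact via pyGetD
      solutionGoA as (S.eraseIdx i)
        (if a < PySem.List.pyGetD S (i : Int) 0 then answer + 1 else answer)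

def solution (A : List Int) (B : List Int) : Int :=
  solutionGoA A (PySem.List.sorted B (fun x => x) false) 0

-- ===== PORT B =====
-- loop 'for b in B_sorted', state = ans (which is also the pointer into A_sorted)
def solutionGoB (As : List Int) : List Int → Int → Int
  | [], ans => ans
  | b :: Bs, ans =>
      solutionGoB As Bs
        (if ans < (As.length : Int) ∧ PySem.List.pyGetD As ans 0 < b then ans + 1 else ans)

def solution_alt (A : List Int) (B : List Int) : Int :=
  solutionGoB (PySem.List.sorted A (fun x => x) false) (PySem.List.sorted B (fun x => x) false) 0

-- ===== PRECONDITION & SPEC =====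
-- Pre_ excludes exactly the inputs where A raises IndexError: when len(A) > len(B), A deletes
-- one element of B per card of A and eventually executes 'del B[0]' on an empty list.
def Pre_solution (A : List Int) (B : List Int) : Prop := A.length ≤ B.length
instance (A : List Int) (B : List Int) : Decidable (Pre_solution A B) := by unfold Pre_solution; infer_instance

def pvWitness_solution : List Int × List Int := ([1], [2])

-- On inputs with len(A) > len(B), A raises IndexError (it deletes one element of B per card of A
-- and runs out); B returns the match count computed from all available cards (0 when B is empty).
def Raises_solution (A : List Int) (B : List Int) : Prop := B.length < A.length
instance (A : List Int) (B : List Int) : Decidable (Raises_solution A B) := by unfold Raises_solution; infer_instance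
def pvRaiseWitness_solution : List Int × List Int := ([0], [])
def pvRaiseWitnessOut_solution : Int := 0

def Spec_solution (A : List Int) (B : List Int) (out : Int) : Prop := out = solution_alt A B
instance (A : List Int) (B : List Int) (out : Int) : Decidable (Spec_solution A B out) := by unfold Spec_solution; infer_instance

-- ===== CLAIM (what is proved, stated in full; the proofs are below) =====
def Claim_equal_solution : Prop := ∀ (A : List Int) (B : List Int), Dom_solution A B → Pre_solution A B → Spec_solution A B (solution A B)
def Claim_raises_solution : Prop := (∀ (A : List Int) (B : List Int), Dom_solution A B → Raises_solution A B → ¬ Pre_solution A B) ∧ (Dom_solution (pvRaiseWitness_solution.1) (pvRaiseWitness_solution.2) ∧ Raises_solution (pvRaiseWitness_solution.1) (pvRaiseWitness_solution.2) ∧ solution_alt (pvRaiseWitness_solution.1) (pvRaiseWitness_solution.2) = pvRaiseWitnessOut_solution)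

-- ===== LEMMAS AND PROOFS =====

-- abbreviation used in the proofs: Python's plain ascending sort
def pvSort (xs : List Int) : List Int := PySem.List.sorted xs (fun x => x) false

-- the two-pointer count, pointer represented as the not-yet-consumed suffix of sorted A
def pvTp : List Int → List Int → Int
  | _, [] => 0
  | [], _ :: Bs => pvTp [] Bs
  | a :: As, b :: Bs => if a < b then 1 + pvTp As Bs else pvTp (a :: As) Bs
termination_by _ Bs => Bs.length

theorem pvTp_nil_right (As : List Int) : pvTp As [] = 0 := by
  cases As <;> simp [pvTp]

theorem pvTp_nil_left (b : Int) (Bs : List Int) : pvTp [] (b :: Bs) = pvTp [] Bs := by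
  simp [pvTp]

theorem pvTp_cons (a : Int) (As : List Int) (b : Int) (Bs : List Int) :
    pvTp (a :: As) (b :: Bs) = if a < b then 1 + pvTp As Bs else pvTp (a :: As) Bs := by
  simp [pvTp]

theorem pvTp_nil (Bs : List Int) : pvTp [] Bs = 0 := by
  induction Bs with
  | nil => simp [pvTp]
  | cons b Bs ih => rw [pvTp_nil_left, ih]

-- K: inserting a card a that beats every remaining b changes nothing (a never gets matched)
theorem pvTp_insert_of_all_le (a : Int) :
    ∀ (T As : List Int), (∀ t ∈ T, t ≤ a) →
      pvTp (List.orderedInsert (· ≤ ·) a As) T = pvTp As T := by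
  intro T
  induction T with
  | nil => intro As _; rw [pvTp_nil_right, pvTp_nil_right]
  | cons t T' ih =>
    intro As hle
    have hta : t ≤ a := hle t (by simp)
    have hT' : ∀ t ∈ T', t ≤ a := fun x hx => hle x (by simp [hx])
    cases As with
    | nil =>
      simp only [List.orderedInsert]
      rw [pvTp_cons, if_neg (by omega), pvTp_nil_left, pvTp_nil]
      simpa [List.orderedInsert, pvTp_nil] using ih [] hT'
    | cons a' As'' =>
      by_cases hca : a ≤ a'
      · simp only [List.orderedInsert, if_pos hca]
        rw [pvTp_cons, if_neg (by omega), pvTp_cons, if_neg (by omega)]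
        have := ih (a' :: As'') hT'
        simpa [List.orderedInsert, if_pos hca] using this
      · simp only [List.orderedInsert, if_neg hca]
        by_cases hm : a' < t
        · rw [pvTp_cons, if_pos hm, pvTp_cons, if_pos hm, ih As'' hT']
        · rw [pvTp_cons, if_neg hm, pvTp_cons, if_neg hm]
          have := ih (a' :: As'') hT'
          simpa [List.orderedInsert, if_neg hca] using this

-- L0: two cards both below every remaining b are interchangeable as the head of the pointer list
theorem pvTp_head_swap (a : Int) :
    ∀ (u : List Int) (a' : Int), a' < a → ∀ (T : List Int), (∀ t ∈ T, a < t) →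
      pvTp (List.orderedInsert (· ≤ ·) a u) T = pvTp (a' :: u) T := by
  intro u
  induction u with
  | nil =>
    intro a' ha T hT
    cases T with
    | nil => rw [pvTp_nil_right, pvTp_nil_right]
    | cons t T' =>
      have := hT t (by simp)
      rw [List.orderedInsert, pvTp_cons, if_pos this, pvTp_cons, if_pos (by omega), pvTp_nil]
  | cons v u' ih =>
    intro a' ha T hT
    by_cases hav : a ≤ v
    · simp only [List.orderedInsert, if_pos hav]
      cases T with
      | nil => rw [pvTp_nil_right, pvTp_nil_right]
      | cons t T' =>
        have := hT t (by simp)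
        rw [pvTp_cons, if_pos this, pvTp_cons, if_pos (by omega)]
    · simp only [List.orderedInsert, if_neg hav]
      cases T with
      | nil => rw [pvTp_nil_right, pvTp_nil_right]
      | cons t T' =>
        have hta := hT t (by simp)
        have hT' : ∀ t ∈ T', a < t := fun x hx => hT x (by simp [hx])
        rw [pvTp_cons, if_pos (by omega), pvTp_cons, if_pos (by omega)]
        rw [ih v (by omega) T' hT']

theorem pvTp_match (a : Int) :
    ∀ (P : List Int) (b : Int) (Q As : List Int),
      (P ++ b :: Q).Pairwise (· ≤ ·) → (∀ p ∈ P, p ≤ a) → a < b →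
      pvTp (List.orderedInsert (· ≤ ·) a As) (P ++ b :: Q) = 1 + pvTp As (P ++ Q) := by
  intro P
  induction P with
  | nil =>
    intro b Q As hs hP hab
    cases As with
    | nil =>
      simp only [List.orderedInsert, List.nil_append]
      rw [pvTp_cons, if_pos hab, pvTp_nil]
    | cons a' As'' =>
      by_cases hca : a ≤ a'
      · simp only [List.orderedInsert, if_pos hca, List.nil_append]
        rw [pvTp_cons, if_pos hab]
      · simp only [List.orderedInsert, if_neg hca, List.nil_append]
        rw [pvTp_cons, if_pos (by omega)]
        have hQ : ∀ t ∈ Q, a < t := by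
          intro t ht
          have := (List.pairwise_cons.mp hs).1 t ht
          omega
        rw [pvTp_head_swap a As'' a' (by omega) Q hQ]
  | cons p P' ih =>
    intro b Q As hs hP hab
    have hpa : p ≤ a := hP p (by simp)
    have hP' : ∀ x ∈ P', x ≤ a := fun x hx => hP x (by simp [hx])
    have hs' : (P' ++ b :: Q).Pairwise (· ≤ ·) := (List.pairwise_cons.mp (by simpa using hs)).2
    cases As with
    | nil =>
      simp only [List.orderedInsert, List.cons_append]
      rw [pvTp_cons, if_neg (by omega)]
      have h1 := ih b Q [] hs' hP' hab
      simp only [List.orderedInsert] at h1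
      rw [h1, pvTp_nil, pvTp_nil]
    | cons a' As'' =>
      by_cases hca : a ≤ a'
      · simp only [List.orderedInsert, if_pos hca, List.cons_append]
        rw [pvTp_cons, if_neg (by omega), pvTp_cons, if_neg (by omega)]
        have h1 := ih b Q (a' :: As'') hs' hP' hab
        simpa [List.orderedInsert, if_pos hca] using h1
      · simp only [List.orderedInsert, if_neg hca, List.cons_append]
        by_cases hm : a' < p
        · rw [pvTp_cons, if_pos hm, pvTp_cons, if_pos hm, ih b Q As'' hs' hP' hab]
        · rw [pvTp_cons, if_neg hm, pvTp_cons, if_neg hm]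
          have h1 := ih b Q (a' :: As'') hs' hP' hab
          simpa [List.orderedInsert, if_neg hca] using h1

theorem pvTp_else (a : Int) :
    ∀ (S As : List Int), S.Pairwise (· ≤ ·) → (∀ t ∈ S, t ≤ a) → As.length < S.length →
      pvTp (List.orderedInsert (· ≤ ·) a As) S = pvTp As S.tail := by
  intro S
  induction S with
  | nil => intro As _ _ hlen; simp at hlen
  | cons s S' ih =>
    intro As hs hle hlen
    have hsa : s ≤ a := hle s (by simp)
    have hle' : ∀ t ∈ S', t ≤ a := fun x hx => hle x (by simp [hx])
    have hs' : S'.Pairwise (· ≤ ·) := (List.pairwise_cons.mp hs).2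
    cases As with
    | nil =>
      simp only [List.orderedInsert, List.tail_cons]
      rw [pvTp_cons, if_neg (by omega), pvTp_nil]
      have h1 := pvTp_insert_of_all_le a S' [] hle'
      simpa [List.orderedInsert, pvTp_nil] using h1
    | cons a' As'' =>
      by_cases hca : a ≤ a'
      · simp only [List.orderedInsert, if_pos hca, List.tail_cons]
        rw [pvTp_cons, if_neg (by omega)]
        have h1 := pvTp_insert_of_all_le a S' (a' :: As'') hle'
        simpa [List.orderedInsert, if_pos hca] using h1
      · simp only [List.orderedInsert, if_neg hca, List.tail_cons]
        by_cases hm : a' < s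
        · rw [pvTp_cons, if_pos hm]
          cases S' with
          | nil => simp only [List.length_cons, List.length_nil] at hlen; omega
          | cons t T =>
            have hst : s ≤ t := (List.pairwise_cons.mp hs).1 t (by simp)
            rw [pvTp_cons, if_pos (by omega)]
            have h1 := ih As'' hs' hle'
              (by simp only [List.length_cons] at hlen ⊢; omega)
            simp only [List.tail_cons] at h1
            rw [h1]
        · rw [pvTp_cons, if_neg hm]
          have h1 := pvTp_insert_of_all_le a S' (a' :: As'') hle'
          simpa [List.orderedInsert, if_neg hca] using h1

theorem pvSort_cons (a : Int) (xs : List Int) :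
    pvSort (a :: xs) = List.orderedInsert (· ≤ ·) a (pvSort xs) := by
  unfold pvSort
  apply PySem.List.sorted_id_eq_of_perm_of_pairwise
  · exact (List.perm_orderedInsert _ a _).trans
      ((PySem.List.sorted_perm xs (fun x => x) false).cons a)
  · exact List.Pairwise.orderedInsert a _
      (by simpa using PySem.List.sorted_pairwise xs (fun x => x))

theorem pvSort_nil : pvSort [] = [] := by
  simp [pvSort, PySem.List.sorted_eq_nil_iff]

theorem solutionGoA_eq (as : List Int) :
    ∀ (S : List Int) (ans : Int), S.Pairwise (· ≤ ·) → as.length ≤ S.length →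
      solutionGoA as S ans = ans + pvTp (pvSort as) S := by
  induction as with
  | nil => intro S ans _ _; rw [pvSort_nil, pvTp_nil]; simp [solutionGoA]
  | cons a as' ih =>
    intro S ans hs hlen
    obtain ⟨hile, hlt, hgt⟩ := PySem.List.bisectRight_spec S a hs
    rw [pvSort_cons]
    show (if ((PySem.List.bisectRight S a : Nat) : Int) > (S.length : Int) - 1 then
        solutionGoA as' (S.eraseIdx 0) ans
      else solutionGoA as' (S.eraseIdx (PySem.List.bisectRight S a))
        (if a < PySem.List.pyGetD S ((PySem.List.bisectRight S a : Nat) : Int) 0 then ans + 1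
         else ans)) = _
    set i := PySem.List.bisectRight S a with hi
    by_cases hbr : ((i : Nat) : Int) > (S.length : Int) - 1
    · rw [if_pos hbr]
      have hallle : ∀ t ∈ S, t ≤ a := by
        intro t ht
        obtain ⟨j, hj, rfl⟩ := List.mem_iff_getElem.mp ht
        exact hlt j hj (by omega)
      cases S with
      | nil => simp at hlen
      | cons s S' =>
        rw [show (s :: S').eraseIdx 0 = S' from rfl]
        rw [ih S' ans (List.pairwise_cons.mp hs).2
          (by simp only [List.length_cons] at hlen; omega)]
        have hlsort : (pvSort as').length = as'.length := by
          simp [pvSort, PySem.List.length_sorted]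
        rw [pvTp_else a (s :: S') (pvSort as') hs hallle
          (by rw [hlsort]; simp only [List.length_cons] at hlen ⊢; omega)]
        simp only [List.tail_cons]
    · rw [if_neg hbr]
      have hilt : i < S.length := by omega
      have hib : a < S[i] := hgt i hilt (le_refl _)
      have hpg : PySem.List.pyGetD S ((i : Nat) : Int) 0 = S[i] := by
        rw [PySem.List.pyGetD_natCast, List.getD_eq_getElem _ _ hilt]
      rw [hpg, if_pos hib]
      have hsE : (S.eraseIdx i).Pairwise (· ≤ ·) :=
        hs.sublist (List.eraseIdx_sublist S i)
      rw [ih (S.eraseIdx i) (ans + 1) hsE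
        (by rw [List.length_eraseIdx_of_lt hilt]
            simp only [List.length_cons] at hlen; omega)]
      have hPle : ∀ p ∈ S.take i, p ≤ a := by
        intro p hp
        obtain ⟨j, hj, rfl⟩ := List.mem_iff_getElem.mp hp
        rw [List.getElem_take]
        exact hlt j (by simp at hj; omega) (by simp at hj; omega)
      have hdecomp : S = S.take i ++ S[i] :: S.drop (i + 1) := by
        conv_lhs => rw [← List.take_append_drop i S]
        rw [List.drop_eq_getElem_cons hilt]
      have herase : S.eraseIdx i = S.take i ++ S.drop (i + 1) :=
        List.eraseIdx_eq_take_drop_succ S i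
      rw [herase]
      conv_rhs => rw [hdecomp]
      rw [pvTp_match a (S.take i) S[i] (S.drop (i + 1)) (pvSort as') (hdecomp ▸ hs) hPle hib]
      ring

theorem solutionGoB_eq (As : List Int) : ∀ (Bs : List Int) (n : Nat),
    solutionGoB As Bs ((n : Nat) : Int) = ((n : Nat) : Int) + pvTp (As.drop n) Bs := by
  intro Bs
  induction Bs with
  | nil => intro n; rw [pvTp_nil_right]; simp [solutionGoB]
  | cons b Bs ih =>
    intro n
    show solutionGoB As Bs
        (if ((n : Nat) : Int) < (As.length : Int) ∧
            PySem.List.pyGetD As ((n : Nat) : Int) 0 < b then ((n : Nat) : Int) + 1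
         else ((n : Nat) : Int)) = _
    by_cases hn : n < As.length
    · have hpg : PySem.List.pyGetD As ((n : Nat) : Int) 0 = As[n] := by
        rw [PySem.List.pyGetD_natCast, List.getD_eq_getElem _ _ hn]
      have hdrop : As.drop n = As[n] :: As.drop (n + 1) := List.drop_eq_getElem_cons hn
      rw [hdrop, pvTp_cons]
      by_cases hb : As[n] < b
      · rw [if_pos ⟨by exact_mod_cast hn, by rw [hpg]; exact hb⟩, if_pos hb]
        have h1 := ih (n + 1)
        push_cast at h1 ⊢
        rw [h1]; ring
      · rw [if_neg (fun hc => hb (by rw [hpg] at hc; exact hc.2)), if_neg hb, ih n, hdrop]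
    · have hdrop : As.drop n = [] := List.drop_eq_nil_of_le (by omega)
      rw [if_neg (fun hc => hn (by exact_mod_cast hc.1)), ih n, hdrop, pvTp_nil, pvTp_nil]

-- ===== VERDICT (by name: the statement is the Claim_ definition above) =====
theorem solution_spec : Claim_equal_solution := by
  intro A B _ hpre
  unfold Spec_solution solution solution_alt
  have hs : (PySem.List.sorted B (fun x => x) false).Pairwise (· ≤ ·) := by
    simpa using PySem.List.sorted_pairwise B (fun x => x)
  have hlen : A.length ≤ (PySem.List.sorted B (fun x => x) false).length := by
    simpa [PySem.List.length_sorted] using hpre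
  rw [solutionGoA_eq A _ 0 hs hlen]
  have := solutionGoB_eq (PySem.List.sorted A (fun x => x) false)
    (PySem.List.sorted B (fun x => x) false) 0
  simpa [pvSort] using this.symm

@[simp] theorem solution_raises : Claim_raises_solution := by
  unfold Claim_raises_solution
  constructor
  · intro A B _ hr hp
    exact absurd hp (by unfold Pre_solution Raises_solution at *; omega)
  · exact ⟨by decide, by decide, by decide⟩
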